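-- pv_equiv track=rewrite | github.com/spglib/spgrep | src/spgrep/transform.py | get_crystal_system
-- ===== SOURCE A (Python) =====
-- from typing import Literal
--
-- def get_crystal_system(
--     hall_number: int,
-- ) -> Literal[
--     "triclinic", "monoclinic", "orthorhombic", "tetragonal", "trigonal", "hexagonal", "cubic"
-- ]:
--     """Return crystal system from Hall number."""
--     crystal_system_range = {
--         "triclinic": [1, 2],
--         "monoclinic": [3, 107],
--         "orthorhombic": [108, 348],
--         "tetragonal": [349, 429],
--         "trigonal": [430, 461],
--         "hexagonal": [462, 488],
--         "cubic": [489, 530],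
--     }
--
--     for csystem, (lb, ub) in crystal_system_range.items():
--         if (lb <= hall_number) and (hall_number <= ub):
--             return csystem  # type: ignore
--
--     raise ValueError("Unknown Hall number: {}".format(hall_number))
-- ===== SOURCE B (Python) =====
-- from bisect import bisect_left
--
-- _UPPER = [2, 107, 348, 429, 461, 488, 530]
-- _LOWER = [1, 3, 108, 349, 430, 462, 489]
-- _NAMES = [
--     "triclinic", "monoclinic", "orthorhombic", "tetragonal",
--     "trigonal", "hexagonal", "cubic",
-- ]
--
-- def get_crystal_system(hall_number):
--     """Return crystal system from Hall number."""
--     i = bisect_left(_UPPER, hall_number)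
--     if i < len(_UPPER) and _LOWER[i] <= hall_number:
--         return _NAMES[i]
--     raise ValueError("Unknown Hall number: {}".format(hall_number))
-- ===== Notes on version B (the rewrite author's own statement) =====
-- stated objective: idiomatic
-- what changed: Replaced the linear scan over a dict of (lb,ub) ranges by a bisect_left binary search on a sorted upper-bound table with a lower-bound check.
import Mathlib
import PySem

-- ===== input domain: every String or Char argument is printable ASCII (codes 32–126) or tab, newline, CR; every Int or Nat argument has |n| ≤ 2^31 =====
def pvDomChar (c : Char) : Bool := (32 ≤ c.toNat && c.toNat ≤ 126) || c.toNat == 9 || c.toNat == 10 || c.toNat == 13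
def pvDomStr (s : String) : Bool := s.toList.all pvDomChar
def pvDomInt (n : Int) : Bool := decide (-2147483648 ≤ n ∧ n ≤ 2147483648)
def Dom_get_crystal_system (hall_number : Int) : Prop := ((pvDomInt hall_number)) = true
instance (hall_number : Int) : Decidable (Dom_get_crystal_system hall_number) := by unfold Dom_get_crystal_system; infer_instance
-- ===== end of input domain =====

-- ===== PORT A =====
-- B replaces A's linear scan over (lb,ub) ranges by a binary search on a sorted upper-bound table (idiomatic bisect).
-- A's dict of ranges, in insertion order.
def csRanges : List (String × Int × Int) :=
  [("triclinic", 1, 2), ("monoclinic", 3, 107), ("orthorhombic", 108, 348),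
   ("tetragonal", 349, 429), ("trigonal", 430, 461), ("hexagonal", 462, 488),
   ("cubic", 489, 530)]

-- the for-loop over the dict items; "" stands for the raise (excluded by Pre_)
def csScan : List (String × Int × Int) → Int → String
  | [], _ => ""
  | (name, lb, ub) :: rest, h => if lb ≤ h ∧ h ≤ ub then name else csScan rest h

def get_crystal_system (hall_number : Int) : String :=
  csScan csRanges hall_number

-- ===== PORT B =====
def csUpper : List Int := [2, 107, 348, 429, 461, 488, 530]
def csLower : List Int := [1, 3, 108, 349, 430, 462, 489]
def csNames : List String :=
  ["triclinic", "monoclinic", "orthorhombic", "tetragonal", "trigonal", "hexagonal", "cubic"]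

-- bisect.bisect_left on a sorted list of Ints (binary search, exact port of the stdlib loop)
-- the `while lo < hi` loop runs at most hi-lo times; the first Nat is that bound (a plain totality guard)
def csBisectLeft (xs : List Int) (x : Int) : Nat → Nat → Nat → Nat
  | 0, lo, _ => lo
  | fuel + 1, lo, hi =>
    if lo < hi then
      let mid := (lo + hi) / 2
      if xs.getD mid 0 < x then csBisectLeft xs x fuel (mid + 1) hi
      else csBisectLeft xs x fuel lo mid
    else lo

def get_crystal_system_alt (hall_number : Int) : String :=
  let i := csBisectLeft csUpper hall_number 7 0 7
  if i < 7 ∧ csLower.getD i 0 ≤ hall_number then csNames.getD i ""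
  else ""  -- the raise (excluded by Pre_)

-- ===== PRECONDITION & SPEC =====
-- A raises ValueError exactly when hall_number is outside 1..530; Pre_ excludes those inputs (B raises there too).
def Pre_get_crystal_system (hall_number : Int) : Prop := 1 ≤ hall_number ∧ hall_number ≤ 530
instance (hall_number : Int) : Decidable (Pre_get_crystal_system hall_number) := by unfold Pre_get_crystal_system; infer_instance
def pvWitness_get_crystal_system : Int := (350)
def Spec_get_crystal_system (hall_number : Int) (out : String) : Prop := out = get_crystal_system_alt hall_number
instance (hall_number : Int) (out : String) : Decidable (Spec_get_crystal_system hall_number out) := by unfold Spec_get_crystal_system; infer_instance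

-- ===== CLAIM (what is proved, stated in full; the proofs are below) =====
def Claim_equal_get_crystal_system : Prop := ∀ (hall_number : Int), Dom_get_crystal_system hall_number → Pre_get_crystal_system hall_number → Spec_get_crystal_system hall_number (get_crystal_system hall_number)

-- ===== LEMMAS AND PROOFS =====
set_option maxRecDepth 4000 in
theorem get_crystal_system_eq (h : Int) (hpre : Pre_get_crystal_system h) :
    get_crystal_system h = get_crystal_system_alt h := by
  obtain ⟨h1, h2⟩ := hpre
  interval_cases h <;> decide

-- ===== VERDICT (by name: the statement is the Claim_ definition above) =====
theorem get_crystal_system_spec : Claim_equal_get_crystal_system := by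
  intro h _ hpre
  exact get_crystal_system_eq h hpre
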